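-- pv_equiv track=rewrite | github.com/Zehaoyu217/DS-AGENT | backend/app/harness/guardrails/end_of_turn.py | _section_bodies
-- ===== SOURCE A (Python) =====
-- REQUIRED_SECTIONS = ("## TODO", "## COT", "## Findings", "## Evidence")
--
-- def _section_bodies(scratchpad: str) -> dict[str, str]:
--     bodies: dict[str, str] = {s: "" for s in REQUIRED_SECTIONS}
--     current = None
--     for line in scratchpad.splitlines():
--         stripped = line.strip()
--         if stripped in REQUIRED_SECTIONS:
--             current = stripped
--             continue
--         if current:
--             bodies[current] += line + "\n"
--     return bodies
-- ===== SOURCE B (Python) =====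
-- REQUIRED_SECTIONS = ("## TODO", "## COT", "## Findings", "## Evidence")
--
-- def _section_bodies(scratchpad: str) -> dict[str, str]:
--     bodies: dict[str, str] = {s: "" for s in REQUIRED_SECTIONS}
--     lines = scratchpad.splitlines()
--     i = 0
--     # drop any preamble before the first header
--     while i < len(lines) and lines[i].strip() not in REQUIRED_SECTIONS:
--         i += 1
--     # consume one (header, segment) block per step
--     while i < len(lines):
--         header = lines[i].strip()
--         j = i + 1
--         while j < len(lines) and lines[j].strip() not in REQUIRED_SECTIONS:
--             j += 1
--         bodies[header] += "".join(l + "\n" for l in lines[i + 1:j])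
--         i = j
--     return bodies
-- ===== Notes on version B (the rewrite author's own statement) =====
-- stated objective: alternative
-- what changed: B first locates the header boundaries, then processes the lines block-by-block: for each header it scans ahead to the next header and appends the whole joined segment at once, instead of A's stateful line-by-line accumulation under a mutable section pointer; lines before the first header are skipped up front.
import Mathlib
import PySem

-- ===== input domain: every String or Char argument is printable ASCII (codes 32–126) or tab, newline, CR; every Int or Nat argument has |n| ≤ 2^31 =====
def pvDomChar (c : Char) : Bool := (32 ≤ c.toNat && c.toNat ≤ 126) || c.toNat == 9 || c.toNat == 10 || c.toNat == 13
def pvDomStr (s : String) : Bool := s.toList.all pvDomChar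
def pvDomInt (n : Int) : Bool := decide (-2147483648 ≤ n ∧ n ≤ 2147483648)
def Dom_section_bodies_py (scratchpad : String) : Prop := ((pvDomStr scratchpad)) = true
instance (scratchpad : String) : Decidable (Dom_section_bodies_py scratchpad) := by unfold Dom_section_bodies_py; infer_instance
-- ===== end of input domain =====

-- B collects the same section bodies but block-by-block: it skips the preamble, then for each
-- header gathers the whole segment up to the next header and appends it joined in one step,
-- instead of A's line-by-line accumulation under a mutable section pointer (objective: alternative).

-- ===== PORT A =====
def pvHeaders : List String := ["## TODO", "## COT", "## Findings", "## Evidence"]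

def pvInit : PySem.Dict String String :=
  pvHeaders.foldl (fun d s => d.insert s "") PySem.Dict.empty

def pvALoop : List String → PySem.Dict String String → Option String → PySem.Dict String String
  | [], d, _ => d
  | l :: ls, d, cur =>
    let stripped := PySem.Str.strip l
    if stripped ∈ pvHeaders then
      pvALoop ls d (some stripped)
    else
      match cur with
      | some h => pvALoop ls (d.insert h (d.getD h "" ++ (l ++ "\n"))) (some h)
      | none => pvALoop ls d none

def section_bodies_py (scratchpad : String) : List (String × String) :=
  (pvALoop (PySem.Str.splitlines scratchpad) pvInit none).items

-- ===== PORT B =====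
def pvNotHeader (l : String) : Bool := !decide (PySem.Str.strip l ∈ pvHeaders)

-- ''.join(l + '\n' for l in seg)
def pvJoinSeg (seg : List String) : String := PySem.Str.join "" (seg.map (· ++ "\n"))

def pvBLoop : List String → PySem.Dict String String → PySem.Dict String String
  | [], d => d
  | h :: rest, d =>
    let header := PySem.Str.strip h
    let seg := rest.takeWhile pvNotHeader
    pvBLoop (rest.dropWhile pvNotHeader)
      (d.insert header (d.getD header "" ++ pvJoinSeg seg))
termination_by lines _ => lines.length
decreasing_by exact Nat.lt_succ_of_le (List.length_dropWhile_le _ _)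

def section_bodies_py_alt (scratchpad : String) : List (String × String) :=
  (pvBLoop ((PySem.Str.splitlines scratchpad).dropWhile pvNotHeader) pvInit).items

-- ===== PRECONDITION & SPEC =====
def Spec_section_bodies_py (scratchpad : String) (out : List (String × String)) : Prop := out = section_bodies_py_alt scratchpad
instance (scratchpad : String) (out : List (String × String)) : Decidable (Spec_section_bodies_py scratchpad out) := by unfold Spec_section_bodies_py; infer_instance

-- ===== CLAIM (what is proved, stated in full; the proofs are below) =====
def Claim_equal_section_bodies_py : Prop := ∀ (scratchpad : String), Dom_section_bodies_py scratchpad → Spec_section_bodies_py scratchpad (section_bodies_py scratchpad)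

-- ===== LEMMAS AND PROOFS =====

-- the dict invariant maintained by both loops: keys are distinct and every header is a key
def pvInv (d : PySem.Dict String String) : Prop :=
  d.keys.Nodup ∧ ∀ s ∈ pvHeaders, d.contains s = true

theorem pvInv_insert (d : PySem.Dict String String) (k v : String) (h : pvInv d) :
    pvInv (d.insert k v) := by
  refine ⟨PySem.Dict.nodup_keys_insert d k v h.1, fun s hs => ?_⟩
  rw [PySem.Dict.contains_insert]
  simp [h.2 s hs]

theorem pvJoin_flat (a : List Char) (rest : List (List Char)) :
    (List.intersperse ([] : List Char) (a :: rest)).flatten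
      = a ++ (List.intersperse [] rest).flatten := by
  cases rest <;> simp

theorem pvJoinSeg_cons (l : String) (seg : List String) :
    pvJoinSeg (l :: seg) = (l ++ "\n") ++ pvJoinSeg seg := by
  simp only [pvJoinSeg, PySem.Str.join, PySem.Chars.join, List.intercalate, List.map_cons]
  rw [show ("".toList : List Char) = [] from rfl, pvJoin_flat, String.ofList_append]
  congr 1
  exact String.ofList_toList

-- rewriting a key to its own value is the identity (keys distinct, key present)
theorem pvInsert_self (d : PySem.Dict String String) (h : String)
    (hnd : d.keys.Nodup) (hc : d.contains h = true) :
    d.insert h (d.getD h "") = d := by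
  have hg : (d.get? h).isSome := by rw [← PySem.Dict.contains_eq_isSome_get?]; exact hc
  obtain ⟨v, hv⟩ := Option.isSome_iff_exists.mp hg
  have hgd : d.getD h "" = v := by rw [PySem.Dict.getD_eq_get?_getD, hv]; rfl
  rw [hgd]
  apply PySem.Dict.ext
  rw [PySem.Dict.items_insert, if_pos hc]
  have : ∀ p ∈ d.items, (if p.1 == h then (h, v) else p) = p := by
    intro p hp
    obtain ⟨k2, v2⟩ := p
    by_cases he : k2 = h
    · subst he
      have h2 : d.get? k2 = some v2 := PySem.Dict.get?_of_mem_items d hp hnd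
      rw [hv] at h2
      simp [← Option.some_inj.mp h2]
    · simp [he]
  rw [List.map_congr_left this, List.map_id']

-- A's per-line appends over a header-free segment, folded
theorem pvSeg_fold (seg : List String) (hseg : ∀ l ∈ seg, pvNotHeader l = true) :
    ∀ tail d h, pvALoop (seg ++ tail) d (some h)
      = pvALoop tail (seg.foldl (fun d l => d.insert h (d.getD h "" ++ (l ++ "\n"))) d) (some h) := by
  induction seg with
  | nil => intro tail d h; rfl
  | cons l seg ih =>
    intro tail d h
    have hl : pvNotHeader l = true := hseg l (by simp)
    have hmem : ¬ PySem.Str.strip l ∈ pvHeaders := by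
      simpa [pvNotHeader] using hl
    rw [List.cons_append, pvALoop]
    simp only [hmem, ite_false]
    exact ih (fun x hx => hseg x (by simp [hx])) tail _ h

-- the fold of per-line appends is one append of the joined segment
theorem pvFold_join (seg : List String) :
    ∀ d h, pvInv d → d.contains h = true →
      seg.foldl (fun d l => d.insert h (d.getD h "" ++ (l ++ "\n"))) d
        = d.insert h (d.getD h "" ++ pvJoinSeg seg) := by
  induction seg with
  | nil =>
    intro d h hinv hc
    simp only [List.foldl_nil, pvJoinSeg, List.map_nil]
    rw [show PySem.Str.join "" [] = "" from rfl, String.append_empty,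
      pvInsert_self d h hinv.1 hc]
  | cons l seg ih =>
    intro d h hinv hc
    rw [List.foldl_cons,
      ih _ h (pvInv_insert d h _ hinv) (PySem.Dict.contains_insert_self d h _),
      PySem.Dict.getD_insert_self, PySem.Dict.insert_insert_self,
      pvJoinSeg_cons, String.append_assoc]

theorem pvHead_dropWhile {p : String → Bool} {lines : List String} {l : String} {rest : List String}
    (hd : lines.dropWhile p = l :: rest) : p l = false := by
  have := List.head?_dropWhile_not p lines
  rw [hd] at this
  simpa using this

-- main lemma, B side: A with current = some h equals B on the remaining block structure
theorem pvBmain : ∀ (n : Nat) (lines : List String), lines.length ≤ n →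
    ∀ d h, pvInv d → h ∈ pvHeaders →
      pvALoop lines d (some h)
        = pvBLoop (lines.dropWhile pvNotHeader)
            (d.insert h (d.getD h "" ++ pvJoinSeg (lines.takeWhile pvNotHeader))) := by
  intro n
  induction n with
  | zero =>
    intro lines hlen d h hinv hh
    have : lines = [] := List.eq_nil_of_length_eq_zero (Nat.le_zero.mp hlen)
    subst this
    simp only [List.dropWhile_nil, List.takeWhile_nil, pvBLoop, pvJoinSeg, List.map_nil]
    rw [show PySem.Str.join "" [] = "" from rfl, String.append_empty,
      pvInsert_self d h hinv.1 (hinv.2 h hh)]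
    rfl
  | succ m ih =>
    intro lines hlen d h hinv hh
    have hsplit : lines.takeWhile pvNotHeader ++ lines.dropWhile pvNotHeader = lines :=
      List.takeWhile_append_dropWhile
    have hseg : ∀ l ∈ lines.takeWhile pvNotHeader, pvNotHeader l = true :=
      fun l hl => List.mem_takeWhile_imp hl
    conv_lhs => rw [← hsplit]
    rw [pvSeg_fold _ hseg, pvFold_join _ _ h hinv (hinv.2 h hh)]
    set d' := d.insert h (d.getD h "" ++ pvJoinSeg (lines.takeWhile pvNotHeader)) with hd'
    have hinv' : pvInv d' := pvInv_insert d h _ hinv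
    rcases hrest : lines.dropWhile pvNotHeader with _ | ⟨l', rest2⟩
    · rw [pvBLoop.eq_def]
      rfl
    · have hl' : pvNotHeader l' = false := pvHead_dropWhile hrest
      have hmem : PySem.Str.strip l' ∈ pvHeaders := by
        simpa [pvNotHeader] using hl'
      have hlen2 : rest2.length ≤ m := by
        have h1 : (lines.dropWhile pvNotHeader).length ≤ lines.length :=
          List.length_dropWhile_le _ _
        rw [hrest] at h1
        simp only [List.length_cons] at h1
        omega
      rw [pvALoop]
      simp only [hmem, if_pos]
      rw [ih rest2 hlen2 d' (PySem.Str.strip l') hinv' hmem]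
      conv_rhs => rw [pvBLoop]

-- main lemma, A side: before the first header, A skips and B's dropWhile skips
theorem pvAmain : ∀ (lines : List String) (d : PySem.Dict String String), pvInv d →
    pvALoop lines d none = pvBLoop (lines.dropWhile pvNotHeader) d := by
  intro lines
  induction lines with
  | nil => intro d _; simp [pvBLoop, pvALoop]
  | cons l ls ih =>
    intro d hinv
    by_cases hmem : PySem.Str.strip l ∈ pvHeaders
    · have hl : pvNotHeader l = false := by simp [pvNotHeader, hmem]
      rw [pvALoop]
      simp only [hmem, if_pos]
      rw [List.dropWhile_cons_of_neg (by simp [hl])]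
      rw [pvBmain ls.length ls (le_refl _) d (PySem.Str.strip l) hinv hmem]
      conv_rhs => rw [pvBLoop]
    · have hl : pvNotHeader l = true := by simp [pvNotHeader, hmem]
      rw [pvALoop]
      simp only [hmem, ite_false]
      rw [List.dropWhile_cons_of_pos (by simp [hl])]
      exact ih d hinv

theorem pvInv_init : pvInv pvInit := by
  constructor
  · decide
  · decide

-- ===== VERDICT (by name: the statement is the Claim_ definition above) =====
theorem section_bodies_py_spec : Claim_equal_section_bodies_py := by
  intro scratchpad _
  unfold Spec_section_bodies_py section_bodies_py section_bodies_py_alt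
  rw [pvAmain _ pvInit pvInv_init]
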